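-- pv_equiv track=rewrite | github.com/endremborza/teach-rajk-prog1-2019f | members/áron/száj többiek megoldásai rekonstruálva_javítva.py | lili_solution
-- ===== SOURCE A (Python) =====
-- def lili_solution(list_of_numbers):
--     int_halves = []
--     for dividend in list_of_numbers:
--         for divisor in list_of_numbers:
--             if divisor*2 == dividend:
--                 int_halves.append(divisor)
--
--     if int_halves == []:
--         return 0
--     else:
--         int_halves.sort
--         smallest_where_double = int(min(int_halves))
--
--         return smallest_where_double
-- ===== SOURCE B (Python) =====
-- def lili_solution(list_of_numbers):
--     values = set(list_of_numbers)
--     for x in sorted(list_of_numbers):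
--         if 2 * x in values:
--             return int(x)
--     return 0
-- ===== Notes on version B (the rewrite author's own statement) =====
-- stated objective: faster
-- what changed: Replaces A's quadratic double scan that collects every halving pair and then takes the min with a sort-first early-return loop: build a set of the values, walk the sorted copy, and return the first x whose 2*x is in the set.
import Mathlib
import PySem

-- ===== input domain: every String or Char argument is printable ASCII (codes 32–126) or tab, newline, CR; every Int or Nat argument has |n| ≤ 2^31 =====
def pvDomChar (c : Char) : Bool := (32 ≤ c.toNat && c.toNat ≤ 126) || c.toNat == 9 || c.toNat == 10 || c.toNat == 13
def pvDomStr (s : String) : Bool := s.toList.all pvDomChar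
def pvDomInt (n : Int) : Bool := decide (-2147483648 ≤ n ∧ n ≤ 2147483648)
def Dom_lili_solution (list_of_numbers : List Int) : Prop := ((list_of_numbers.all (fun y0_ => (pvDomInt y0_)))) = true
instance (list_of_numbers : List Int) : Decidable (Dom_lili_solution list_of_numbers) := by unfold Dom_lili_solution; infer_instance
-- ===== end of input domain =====

-- B replaces A's quadratic collect-all-halves-then-min double scan with a set build plus a
-- sorted early-return scan (objective: faster, asymptotic).

-- ===== PORT A =====
-- A: collect every divisor whose double occurs in the list (nested loops), then min (or 0 if none).
def lili_solution (list_of_numbers : List Int) : Int :=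
  let int_halves : List Int :=
    list_of_numbers.foldl (fun acc dividend =>
      list_of_numbers.foldl (fun acc2 divisor =>
        if divisor * 2 == dividend then acc2 ++ [divisor] else acc2) acc) []
  if int_halves == [] then 0
  else ((PySem.List.min? int_halves (fun x => x)).getD 0)

-- ===== PORT B =====
-- B's loop: first element of the (already sorted) list whose double is in the set, else 0.
def lili_solution_altLoop (values : PySem.Set Int) : List Int → Int
  | [] => 0
  | x :: rest => if values.contains (2 * x) then x else lili_solution_altLoop values rest

def lili_solution_alt (list_of_numbers : List Int) : Int :=
  lili_solution_altLoop (PySem.Set.ofList list_of_numbers)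
    (PySem.List.sorted list_of_numbers (fun x => x) false)

-- ===== PRECONDITION & SPEC =====
def Spec_lili_solution (list_of_numbers : List Int) (out : Int) : Prop := out = lili_solution_alt list_of_numbers
instance (list_of_numbers : List Int) (out : Int) : Decidable (Spec_lili_solution list_of_numbers out) := by unfold Spec_lili_solution; infer_instance

-- ===== CLAIM (what is proved, stated in full; the proofs are below) =====
def Claim_equal_lili_solution : Prop := ∀ (list_of_numbers : List Int), Dom_lili_solution list_of_numbers → Spec_lili_solution list_of_numbers (lili_solution list_of_numbers)

-- ===== LEMMAS AND PROOFS =====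

-- A's collected list is the flatMap of filters; membership characterisation.
lemma halves_eq (l : List Int) :
    l.foldl (fun acc dividend =>
      l.foldl (fun acc2 divisor =>
        if divisor * 2 == dividend then acc2 ++ [divisor] else acc2) acc) []
    = l.flatMap (fun a => l.filter (fun d => d * 2 == a)) := by
  have h : ∀ (acc : List Int) (a : Int),
      l.foldl (fun acc2 divisor =>
        if divisor * 2 == a then acc2 ++ [divisor] else acc2) acc
      = acc ++ l.filter (fun d => d * 2 == a) :=
    fun acc a => PySem.List.foldl_append_if_eq_filter (fun d => d * 2 == a) l acc
  rw [show (fun (acc : List Int) dividend =>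
        l.foldl (fun acc2 divisor =>
          if divisor * 2 == dividend then acc2 ++ [divisor] else acc2) acc)
      = (fun acc a => acc ++ l.filter (fun d => d * 2 == a)) from
      funext fun acc => funext fun a => h acc a]
  exact PySem.List.foldl_append_eq_flatMap _ l []

lemma mem_halves (l : List Int) (x : Int) :
    x ∈ l.flatMap (fun a => l.filter (fun d => d * 2 == a)) ↔ x ∈ l ∧ 2 * x ∈ l := by
  simp only [List.mem_flatMap, List.mem_filter, beq_iff_eq]
  constructor
  · rintro ⟨a, ha, hx, rfl⟩; exact ⟨hx, by rwa [mul_comm]⟩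
  · rintro ⟨hx, h2⟩; exact ⟨x * 2, by rwa [mul_comm] at h2, hx, rfl⟩

lemma altLoop_of_none (v : PySem.Set Int) (s : List Int)
    (h : ∀ y ∈ s, v.contains (2 * y) = false) : lili_solution_altLoop v s = 0 := by
  induction s with
  | nil => rfl
  | cons x rest ih =>
      simp only [lili_solution_altLoop, h x (List.mem_cons_self ..)]
      exact ih (fun y hy => h y (List.mem_cons_of_mem _ hy))

lemma altLoop_of_min (v : PySem.Set Int) (s : List Int) (m : Int)
    (hsort : s.Pairwise (· ≤ ·)) (hm : m ∈ s) (hPm : v.contains (2 * m) = true)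
    (hmin : ∀ y ∈ s, v.contains (2 * y) = true → m ≤ y) :
    lili_solution_altLoop v s = m := by
  induction s with
  | nil => cases hm
  | cons x rest ih =>
      rw [List.pairwise_cons] at hsort
      by_cases hx : v.contains (2 * x) = true
      · simp only [lili_solution_altLoop, hx, if_true]
        have h1 : m ≤ x := hmin x (List.mem_cons_self ..) hx
        have h2 : x ≤ m := by
          rcases List.mem_cons.mp hm with rfl | hmem
          · exact le_refl _
          · exact hsort.1 m hmem
        exact le_antisymm h2 h1
      · simp only [lili_solution_altLoop, hx]
        have hm' : m ∈ rest := by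
          rcases List.mem_cons.mp hm with rfl | hmem
          · exact absurd hPm hx
          · exact hmem
        exact ih hsort.2 hm' (fun y hy hp => hmin y (List.mem_cons_of_mem _ hy) hp)

lemma contains_set (l : List Int) (z : Int) :
    PySem.Set.contains (PySem.Set.ofList l) z = true ↔ z ∈ l := by
  rw [PySem.Set.contains_iff, PySem.Set.mem_ofList]

-- ===== VERDICT (by name: the statement is the Claim_ definition above) =====
theorem lili_solution_spec : Claim_equal_lili_solution := by
  intro l _
  show lili_solution l = lili_solution_alt l
  unfold lili_solution lili_solution_alt
  simp only [halves_eq]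
  set halves := l.flatMap (fun a => l.filter (fun d => d * 2 == a)) with hh
  by_cases he : halves = []
  · rw [he]
    simp only [beq_self_eq_true, if_true]
    refine (altLoop_of_none _ _ (fun y hy => ?_)).symm
    by_contra hc
    have hy' : y ∈ l := (PySem.List.mem_sorted ..).mp hy
    have h2 : 2 * y ∈ l := (contains_set l (2 * y)).mp (by
      cases hb : PySem.Set.contains (PySem.Set.ofList l) (2 * y) with
      | true => rfl
      | false => exact absurd hb hc)
    have : y ∈ halves := (mem_halves l y).mpr ⟨hy', h2⟩
    rw [he] at this; cases this
  · have hne : (halves == []) = false := beq_eq_false_iff_ne.mpr he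
    rw [hne]
    simp only [Bool.false_eq_true, if_false]
    obtain ⟨m, hmin⟩ : ∃ m, PySem.List.min? halves (fun x => x) = some m := by
      cases hm : PySem.List.min? halves (fun x => x) with
      | none => exact absurd ((PySem.List.min?_eq_none_iff ..).mp hm) he
      | some m => exact ⟨m, rfl⟩
    rw [hmin]
    simp only [Option.getD_some]
    have hmem : m ∈ halves := PySem.List.min?_mem hmin
    have hml : m ∈ l ∧ 2 * m ∈ l := (mem_halves l m).mp hmem
    refine (altLoop_of_min _ _ m (PySem.List.sorted_pairwise ..) ?_ ?_ ?_).symm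
    · exact (PySem.List.mem_sorted ..).mpr hml.1
    · exact (contains_set l (2 * m)).mpr hml.2
    · intro y hy hp
      have hy' : y ∈ l := (PySem.List.mem_sorted ..).mp hy
      have h2 : 2 * y ∈ l := (contains_set l (2 * y)).mp hp
      have := PySem.List.min?_isMin hmin y ((mem_halves l y).mpr ⟨hy', h2⟩)
      simpa using this
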